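-- pv_equiv track=rewrite | github.com/Exilliar/advent-of-code-2024 | day9/q1.py | checkIncomplete
-- ===== SOURCE A (Python) =====
-- def checkIncomplete(unfragged: list) -> bool:
--     foundDot = False
--     for f in unfragged:
--         if f == ".":
--             foundDot = True
--         if foundDot and f != ".":
--             return True
--     return False
-- ===== SOURCE B (Python) =====
-- def checkIncomplete(unfragged: list) -> bool:
--     # Strip all trailing dots off the end, then simply ask whether a dot remains:
--     # a dot that is not part of the trailing run of dots must have a non-dot after it.
--     rest = list(reversed(unfragged))
--     while rest and rest[0] == ".":
--         rest = rest[1:]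
--     return "." in rest
-- ===== Notes on version B (the rewrite author's own statement) =====
-- stated objective: alternative
-- what changed: Instead of A's forward flag-scan that returns on the first non-dot seen after a dot, B works back-to-front: it strips the trailing run of dots off the reversed list and then returns whether a dot is still present (correct because a remaining dot necessarily has a non-dot after it).
import Mathlib
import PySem

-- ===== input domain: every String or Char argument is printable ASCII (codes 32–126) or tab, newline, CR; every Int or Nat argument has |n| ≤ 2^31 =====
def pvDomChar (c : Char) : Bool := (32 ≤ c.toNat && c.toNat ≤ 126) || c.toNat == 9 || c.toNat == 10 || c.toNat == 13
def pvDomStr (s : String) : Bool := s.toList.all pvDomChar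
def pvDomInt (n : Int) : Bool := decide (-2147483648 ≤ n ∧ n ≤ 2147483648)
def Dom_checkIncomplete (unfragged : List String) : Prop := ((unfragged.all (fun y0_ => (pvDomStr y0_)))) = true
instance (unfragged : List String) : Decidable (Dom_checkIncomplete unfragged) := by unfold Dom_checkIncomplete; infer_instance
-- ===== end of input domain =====

-- B replaces A's forward flag-scan by strip-trailing-dots-from-the-end then a dot-membership test; objective: alternative.


-- ===== PORT A =====
-- the for-loop with its early return and the foundDot flag, as structural recursion over the list with the flag as state
def checkIncompleteGo : List String → Bool → Bool
  | [], _ => false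
  | f :: rest, foundDot =>
    let fd := if f == "." then true else foundDot
    if fd && f != "." then true else checkIncompleteGo rest fd

def checkIncomplete (unfragged : List String) : Bool := checkIncompleteGo unfragged false

-- ===== PORT B =====
-- the 'while rest and rest[0] == ".": rest = rest[1:]' loop of Source B
def stripLeadDots : List String → List String
  | [] => []
  | f :: rest => if f == "." then stripLeadDots rest else f :: rest

def checkIncomplete_alt (unfragged : List String) : Bool :=
  (stripLeadDots unfragged.reverse).contains "."

-- ===== PRECONDITION & SPEC =====
def Spec_checkIncomplete (unfragged : List String) (out : Bool) : Prop := out = checkIncomplete_alt unfragged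
instance (unfragged : List String) (out : Bool) : Decidable (Spec_checkIncomplete unfragged out) := by unfold Spec_checkIncomplete; infer_instance

-- ===== CLAIM =====
def Claim_equal_checkIncomplete : Prop := ∀ (unfragged : List String), Dom_checkIncomplete unfragged → Spec_checkIncomplete unfragged (checkIncomplete unfragged)

-- ===== LEMMAS AND PROOFS =====

-- once A's flag is set, the rest of its loop just looks for any non-dot element
theorem go_true (xs : List String) : checkIncompleteGo xs true = xs.any (fun f => f != ".") := by
  induction xs with
  | nil => rfl
  | cons f rest ih =>
    by_cases h : f = "."
    · subst h; simpa [checkIncompleteGo] using ih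
    · simp [checkIncompleteGo, h]

-- common characterisation: skip the leading non-dots, then look for a non-dot
theorem go_false (xs : List String) :
    checkIncompleteGo xs false = (xs.dropWhile (fun f => f != ".")).any (fun f => f != ".") := by
  induction xs with
  | nil => rfl
  | cons f rest ih =>
    by_cases h : f = "."
    · subst h; simp [checkIncompleteGo, go_true]
    · simpa [checkIncompleteGo, List.dropWhile_cons, h] using ih

theorem stripLeadDots_append_dot (ys : List String) :
    stripLeadDots (("." : String) :: ys) = stripLeadDots ys := by
  simp [stripLeadDots]

theorem dropWhile_nil_iff (ys : List String) :
    ys.dropWhile (fun f => f != ".") = [] ↔ ("." : String) ∉ ys := by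
  rw [List.dropWhile_eq_nil_iff]
  constructor
  · intro h hmem; simpa using h _ hmem
  · intro h x hx; by_contra hne; simp at hne; exact h (hne ▸ hx)

-- B = the common characterisation, by induction from the back
theorem alt_eq_dropWhile (xs : List String) :
    checkIncomplete_alt xs = (xs.dropWhile (fun f => f != ".")).any (fun f => f != ".") := by
  induction xs using List.reverseRecOn with
  | nil => rfl
  | append_singleton ys a ih =>
    unfold checkIncomplete_alt at *
    rw [List.reverse_append, List.reverse_singleton, List.singleton_append]
    by_cases h : a = "."
    · subst h
      rw [stripLeadDots_append_dot, ih, List.dropWhile_append]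
      by_cases hd : ys.dropWhile (fun f => f != ".") = []
      · simp [hd]
      · simp [hd]
    · rw [show stripLeadDots (a :: ys.reverse) = a :: ys.reverse by simp [stripLeadDots, h]]
      rw [List.dropWhile_append]
      by_cases hd : ys.dropWhile (fun f => f != ".") = []
      · have hmem : ("." : String) ∉ ys := (dropWhile_nil_iff ys).1 hd
        have hb : (a != ".") = true := by simp [h]
        simp [hd, List.dropWhile, hb, hmem, Ne.symm h]
      · have hmem : ("." : String) ∈ ys := by
          by_contra hm
          exact hd ((dropWhile_nil_iff ys).2 hm)
        simp [hd, h, hmem]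

-- ===== VERDICT =====
theorem checkIncomplete_spec : Claim_equal_checkIncomplete := by
  intro xs _
  unfold Spec_checkIncomplete checkIncomplete
  rw [go_false, alt_eq_dropWhile]
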